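-- pv_equiv track=rewrite | github.com/CPADelaney/flask_roleplay | nyx/nyx_agent/feasibility.py | _canonicalize_mundane_search_token
-- ===== SOURCE A (Python) =====
-- from typing import Any, Dict, Iterable, List, Optional, Set, Tuple
--
-- MUNDANE_SEARCH_TOKEN_SYNONYMS: Dict[str, Set[str]] = {
--     "coin": {"coin", "coins", "penny", "pennies", "small coin", "loose coin"},
--     "rock": {"rock", "rocks", "stone", "stones", "boulder", "boulders"},
--     "pebble": {"pebble", "pebbles"},
--     "small_object": {
--         "small object",
--         "small_object",
--         "small item",
--         "small items",
--         "tiny object",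
--         "tiny item",
--         "little object",
--         "little item",
--         "trinket",
--         "trinkets",
--     },
-- }
--
-- def _normalize_location_phrase(value: Any) -> str:
--     if value is None:
--         return ""
--     return " ".join(str(value).replace("_", " ").split()).strip().lower()
--
-- def _canonicalize_mundane_search_token(token: str) -> Optional[str]:
--     raw = str(token).strip().lower()
--     normalized = _normalize_location_phrase(token)
--     for canonical, synonyms in MUNDANE_SEARCH_TOKEN_SYNONYMS.items():
--         if raw in synonyms or normalized in synonyms:
--             return canonical
--     if normalized.endswith("s"):
--         singular = normalized[:-1]
--         for canonical, synonyms in MUNDANE_SEARCH_TOKEN_SYNONYMS.items():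
--             if singular in synonyms:
--                 return canonical
--     return None
-- ===== SOURCE B (Python) =====
-- from typing import Dict, Optional, Tuple
--
-- # Flat reverse index, built once: synonym -> (category rank, canonical name).
-- # The rank keeps the original category-order priority between the two candidate forms.
-- SYNONYM_TO_CANONICAL: Dict[str, Tuple[int, str]] = {
--     "coin": (0, "coin"), "coins": (0, "coin"), "penny": (0, "coin"), "pennies": (0, "coin"),
--     "small coin": (0, "coin"), "loose coin": (0, "coin"),
--     "rock": (1, "rock"), "rocks": (1, "rock"), "stone": (1, "rock"), "stones": (1, "rock"),
--     "boulder": (1, "rock"), "boulders": (1, "rock"),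
--     "pebble": (2, "pebble"), "pebbles": (2, "pebble"),
--     "small object": (3, "small_object"), "small_object": (3, "small_object"),
--     "small item": (3, "small_object"), "small items": (3, "small_object"),
--     "tiny object": (3, "small_object"), "tiny item": (3, "small_object"),
--     "little object": (3, "small_object"), "little item": (3, "small_object"),
--     "trinket": (3, "small_object"), "trinkets": (3, "small_object"),
-- }
--
-- def _canonicalize_mundane_search_token(token: str) -> Optional[str]:
--     raw = str(token).strip().lower()
--     normalized = " ".join(str(token).replace("_", " ").split()).strip().lower()
--     a = SYNONYM_TO_CANONICAL.get(raw)
--     b = SYNONYM_TO_CANONICAL.get(normalized)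
--     if a is not None and b is not None:
--         hit = a if a[0] <= b[0] else b
--     else:
--         hit = a if a is not None else b
--     if hit is not None:
--         return hit[1]
--     if normalized.endswith("s"):
--         hit = SYNONYM_TO_CANONICAL.get(normalized[:-1])
--         if hit is not None:
--             return hit[1]
--     return None
-- ===== Notes on version B (the rewrite author's own statement) =====
-- stated objective: alternative
-- what changed: Replaces A's two scans over the category synonym sets by a single flat reverse index synonym -> (category rank, canonical) built once at module load; the function becomes direct dict lookups, with the rank keeping the original category-order priority between the raw and normalized candidates.
import Mathlib
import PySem

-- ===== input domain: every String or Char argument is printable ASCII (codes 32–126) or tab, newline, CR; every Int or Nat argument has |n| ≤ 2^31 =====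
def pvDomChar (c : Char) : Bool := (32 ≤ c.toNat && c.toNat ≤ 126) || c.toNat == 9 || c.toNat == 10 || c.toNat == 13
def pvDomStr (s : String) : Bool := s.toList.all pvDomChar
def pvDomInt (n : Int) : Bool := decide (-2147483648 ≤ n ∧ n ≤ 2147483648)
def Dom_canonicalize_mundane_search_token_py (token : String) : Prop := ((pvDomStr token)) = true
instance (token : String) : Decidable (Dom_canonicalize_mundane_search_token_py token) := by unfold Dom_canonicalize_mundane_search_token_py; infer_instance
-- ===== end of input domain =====

-- B replaces A's two scans over the category sets by a single prebuilt reverse index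
-- synonym -> (category rank, canonical); objective: alternative (direct lookups instead of scanning).

-- ===== PORT A =====
def pvMundaneSynonyms : List (String × PySem.Set String) :=
  [("coin", PySem.Set.ofList ["coin", "coins", "penny", "pennies", "small coin", "loose coin"]),
   ("rock", PySem.Set.ofList ["rock", "rocks", "stone", "stones", "boulder", "boulders"]),
   ("pebble", PySem.Set.ofList ["pebble", "pebbles"]),
   ("small_object", PySem.Set.ofList ["small object", "small_object", "small item", "small items",
      "tiny object", "tiny item", "little object", "little item", "trinket", "trinkets"])]

-- _normalize_location_phrase(token) for a str argument (token is never None here)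
def pvNormalizePhrase (token : String) : String :=
  PySem.Str.lower (PySem.Str.strip (PySem.Str.join " " (PySem.Str.split₀ (PySem.Str.replace token "_" " "))))

def canonicalize_mundane_search_token_py (token : String) : Option String :=
  let raw := PySem.Str.lower (PySem.Str.strip token)
  let normalized := pvNormalizePhrase token
  -- first for-loop with early return
  match pvMundaneSynonyms.find? (fun p => PySem.Set.contains p.2 raw || PySem.Set.contains p.2 normalized) with
  | some p => some p.1
  | none =>
    if PySem.Str.endswith normalized "s" then
      let singular := PySem.Str.slice normalized none (some (-1))
      -- second for-loop with early return
      match pvMundaneSynonyms.find? (fun p => PySem.Set.contains p.2 singular) with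
      | some p => some p.1
      | none => none
    else none

-- ===== PORT B =====
-- SYNONYM_TO_CANONICAL: flat reverse index synonym -> (category rank, canonical)
def pvSynToCanon : PySem.Dict String (Int × String) := PySem.Dict.mk
  [("coin", (0, "coin")), ("coins", (0, "coin")), ("penny", (0, "coin")), ("pennies", (0, "coin")),
   ("small coin", (0, "coin")), ("loose coin", (0, "coin")),
   ("rock", (1, "rock")), ("rocks", (1, "rock")), ("stone", (1, "rock")), ("stones", (1, "rock")),
   ("boulder", (1, "rock")), ("boulders", (1, "rock")),
   ("pebble", (2, "pebble")), ("pebbles", (2, "pebble")),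
   ("small object", (3, "small_object")), ("small_object", (3, "small_object")),
   ("small item", (3, "small_object")), ("small items", (3, "small_object")),
   ("tiny object", (3, "small_object")), ("tiny item", (3, "small_object")),
   ("little object", (3, "small_object")), ("little item", (3, "small_object")),
   ("trinket", (3, "small_object")), ("trinkets", (3, "small_object"))]

-- rank-min combination of the two candidate lookups (keeps dict-order priority)
def pvCombine (a b : Option (Int × String)) : Option (Int × String) :=
  match a, b with
  | some x, some y => some (if x.1 ≤ y.1 then x else y)
  | some x, none => some x
  | none, some y => some y
  | none, none => none

def canonicalize_mundane_search_token_py_alt (token : String) : Option String :=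
  let raw := PySem.Str.lower (PySem.Str.strip token)
  let normalized := pvNormalizePhrase token
  let hit := pvCombine (pvSynToCanon.get? raw) (pvSynToCanon.get? normalized)
  match hit with
  | some p => some p.2
  | none =>
    if PySem.Str.endswith normalized "s" then
      (pvSynToCanon.get? (PySem.Str.slice normalized none (some (-1)))).map (·.2)
    else none

-- ===== PRECONDITION & SPEC =====
def Spec_canonicalize_mundane_search_token_py (token : String) (out : Option String) : Prop := out = canonicalize_mundane_search_token_py_alt token
instance (token : String) (out : Option String) : Decidable (Spec_canonicalize_mundane_search_token_py token out) := by unfold Spec_canonicalize_mundane_search_token_py; infer_instance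

-- ===== CLAIM (what is proved, stated in full; the proofs are below) =====
def Claim_equal_canonicalize_mundane_search_token_py : Prop := ∀ (token : String), Dom_canonicalize_mundane_search_token_py token → Spec_canonicalize_mundane_search_token_py token (canonicalize_mundane_search_token_py token)

-- ===== LEMMAS AND PROOFS =====

-- all 26 synonyms
def pvAllSyns : List String :=
  ["coin", "coins", "penny", "pennies", "small coin", "loose coin",
   "rock", "rocks", "stone", "stones", "boulder", "boulders",
   "pebble", "pebbles",
   "small object", "small_object", "small item", "small items",
   "tiny object", "tiny item", "little object", "little item", "trinket", "trinkets"]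

lemma pv_get?_none {s : String} (h : s ∉ pvAllSyns) : pvSynToCanon.get? s = none := by
  simp only [pvAllSyns, List.mem_cons, not_or] at h
  obtain ⟨h1,h2,h3,h4,h5,h6,h7,h8,h9,h10,h11,h12,h13,h14,h15,h16,h17,h18,h19,h20,h21,h22,h23,h24,-⟩ := h
  simp [pvSynToCanon, PySem.Dict.get?, Ne.symm h1, Ne.symm h2, Ne.symm h3, Ne.symm h4, Ne.symm h5,
    Ne.symm h6, Ne.symm h7, Ne.symm h8, Ne.symm h9, Ne.symm h10, Ne.symm h11, Ne.symm h12,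
    Ne.symm h13, Ne.symm h14, Ne.symm h15, Ne.symm h16, Ne.symm h17, Ne.symm h18, Ne.symm h19,
    Ne.symm h20, Ne.symm h21, Ne.symm h22, Ne.symm h23, Ne.symm h24]

lemma pv_contains_false {s : String} (h : s ∉ pvAllSyns) (p : String × PySem.Set String)
    (hp : p ∈ pvMundaneSynonyms) : PySem.Set.contains p.2 s = false := by
  simp only [pvAllSyns, List.mem_cons, not_or] at h
  obtain ⟨h1,h2,h3,h4,h5,h6,h7,h8,h9,h10,h11,h12,h13,h14,h15,h16,h17,h18,h19,h20,h21,h22,h23,h24,-⟩ := h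
  simp only [pvMundaneSynonyms, List.mem_cons, List.not_mem_nil, or_false] at hp
  rcases hp with rfl|rfl|rfl|rfl <;>
    simp [PySem.Set.contains, PySem.Set.ofList, h1, h2, h3, h4, h5, h6, h7, h8, h9, h10, h11, h12,
      h13, h14, h15, h16, h17, h18, h19, h20, h21, h22, h23, h24]

-- a disjunct that is false on every element drops out of a find? scan
lemma pv_find?_or_right {α : Type} (f g : α → Bool) (l : List α) (h : ∀ p ∈ l, g p = false) :
    l.find? (fun p => f p || g p) = l.find? f := by
  induction l with
  | nil => rfl
  | cons a t ih =>
    have ha := h a (by simp)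
    cases hfa : f a with
    | true => simp [hfa]
    | false => simp [hfa, ha, ih (fun p hp => h p (List.mem_cons_of_mem _ hp))]

lemma pv_find?_or_left {α : Type} (f g : α → Bool) (l : List α) (h : ∀ p ∈ l, f p = false) :
    l.find? (fun p => f p || g p) = l.find? g := by
  induction l with
  | nil => rfl
  | cons a t ih =>
    have ha := h a (by simp)
    cases hga : g a with
    | true => simp [hga, ha]
    | false => simp [hga, ha, ih (fun p hp => h p (List.mem_cons_of_mem _ hp))]

-- the single-string scan of A equals a lookup in the flat index
lemma pv_scan2_eq (s : String) :
    (pvMundaneSynonyms.find? (fun p => PySem.Set.contains p.2 s)).map (·.1)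
      = (pvSynToCanon.get? s).map (·.2) := by
  by_cases h : s ∈ pvAllSyns
  · simp only [pvAllSyns, List.mem_cons, List.not_mem_nil, or_false] at h
    rcases h with rfl|rfl|rfl|rfl|rfl|rfl|rfl|rfl|rfl|rfl|rfl|rfl|rfl|rfl|rfl|rfl|rfl|rfl|rfl|rfl|rfl|rfl|rfl|rfl <;> decide
  · rw [pv_get?_none h]
    rw [List.find?_eq_none.mpr (fun p hp => by simpa using pv_contains_false h p hp)]
    rfl

-- the two-candidate scan of A equals the rank-min combination of two lookups in the flat index
lemma pv_scan1_eq (r n : String) :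
    (pvMundaneSynonyms.find? (fun p => PySem.Set.contains p.2 r || PySem.Set.contains p.2 n)).map (·.1)
      = (pvCombine (pvSynToCanon.get? r) (pvSynToCanon.get? n)).map (·.2) := by
  by_cases hr : r ∈ pvAllSyns
  · by_cases hn : n ∈ pvAllSyns
    · simp only [pvAllSyns, List.mem_cons, List.not_mem_nil, or_false] at hr hn
      rcases hr with rfl|rfl|rfl|rfl|rfl|rfl|rfl|rfl|rfl|rfl|rfl|rfl|rfl|rfl|rfl|rfl|rfl|rfl|rfl|rfl|rfl|rfl|rfl|rfl <;>
        rcases hn with rfl|rfl|rfl|rfl|rfl|rfl|rfl|rfl|rfl|rfl|rfl|rfl|rfl|rfl|rfl|rfl|rfl|rfl|rfl|rfl|rfl|rfl|rfl|rfl <;> decide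
    · rw [pv_find?_or_right _ _ _ (fun p hp => pv_contains_false hn p hp), pv_get?_none hn]
      rw [pv_scan2_eq r]
      cases pvSynToCanon.get? r <;> rfl
  · rw [pv_find?_or_left _ _ _ (fun p hp => pv_contains_false hr p hp), pv_get?_none hr]
    rw [pv_scan2_eq n]
    cases pvSynToCanon.get? n <;> rfl

-- full body equality, with the raw and normalized strings abstracted
lemma pv_main (r n : String) :
    (match (pvMundaneSynonyms.find? (fun p => PySem.Set.contains p.2 r || PySem.Set.contains p.2 n) :
        Option (String × PySem.Set String)) with
     | some p => some p.1
     | none =>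
       if PySem.Str.endswith n "s" then
         match pvMundaneSynonyms.find?
             (fun (p : String × PySem.Set String) =>
               PySem.Set.contains p.2 (PySem.Str.slice n none (some (-1)))) with
         | some p => some p.1
         | none => none
       else none)
    = (match (pvCombine (pvSynToCanon.get? r) (pvSynToCanon.get? n) : Option (Int × String)) with
       | some p => some p.2
       | none =>
         if PySem.Str.endswith n "s" then
           ((pvSynToCanon.get? (PySem.Str.slice n none (some (-1))) : Option (Int × String))).map
             (fun q => q.2)
         else none) := by
  have h1 := pv_scan1_eq r n
  have h2 := pv_scan2_eq (PySem.Str.slice n none (some (-1)))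
  cases hf : pvMundaneSynonyms.find? (fun p => PySem.Set.contains p.2 r || PySem.Set.contains p.2 n) with
  | some p =>
    rw [hf] at h1
    cases hc : pvCombine (pvSynToCanon.get? r) (pvSynToCanon.get? n) with
    | some q => rw [hc] at h1; simpa using h1
    | none => rw [hc] at h1; simp at h1
  | none =>
    rw [hf] at h1
    cases hc : pvCombine (pvSynToCanon.get? r) (pvSynToCanon.get? n) with
    | some q => rw [hc] at h1; simp at h1
    | none =>
      by_cases he : PySem.Chars.endswith n.toList ['s'] = true
      · cases hg : pvMundaneSynonyms.find?
            (fun p => PySem.Set.contains p.2 (PySem.Str.slice n none (some (-1)))) with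
        | some p =>
          rw [hg] at h2
          cases hq : pvSynToCanon.get? (PySem.Str.slice n none (some (-1))) with
          | some q => rw [hq] at h2; simp at h2; simp [he, h2]
          | none => rw [hq] at h2; simp at h2
        | none =>
          rw [hg] at h2
          cases hq : pvSynToCanon.get? (PySem.Str.slice n none (some (-1))) with
          | some q => rw [hq] at h2; simp at h2
          | none => simp [he]
      · simp only [Bool.not_eq_true] at he
        simp [he]

-- ===== VERDICT (by name: the statement is the Claim_ definition above) =====
theorem canonicalize_mundane_search_token_py_spec : Claim_equal_canonicalize_mundane_search_token_py := by
  intro token _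
  unfold Spec_canonicalize_mundane_search_token_py
  simp only [canonicalize_mundane_search_token_py, canonicalize_mundane_search_token_py_alt]
  exact pv_main (PySem.Str.lower (PySem.Str.strip token)) (pvNormalizePhrase token)
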